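-- pv_equiv track=rewrite | github.com/Birdy-C/DailyCodingProblem | Subscription/72#^-dfs-dp-MaxPathValue.py | max_path
-- ===== SOURCE A (Python) =====
-- from collections import Counter
--
-- def max_path(s, lst):
--     adj = [[] for v in s]
--     # Build adjacency list
--     for u, v in lst:
--         adj[u].append(v)
--
--     maximum_path = 0
--     # Try every path from node v.
--     for v in range(len(s)):
--         stack = [(s[v], set([v]), v)] # Every item in the stack has form (path_string, visited, current_node)
--         while stack:
--             path_string, visited, current_node = stack.pop()
--             # Count value of current path and update maximum_path if necessary
--             cnt = Counter(path_string)
--             _, path_val = cnt.most_common(1)[0]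
--             maximum_path = max(maximum_path, path_val)
--             for neighbour in adj[current_node]:
--                 if neighbour in visited:
--                     # There is a cycle.
--                     return None
--                 stack.append((path_string + s[neighbour], visited.union([neighbour]), neighbour))
--     return maximum_path
-- ===== SOURCE B (Python) =====
-- def max_path(s, lst):
--     n = len(s)
--     adj = [[] for _ in s]
--     for u, v in lst:
--         adj[u].append(v)
--
--     def dfs(node, visited, counts):
--         # best value over all path extensions of the current path; None on a cycle
--         best = max(counts.values())
--         for w in adj[node]:
--             if w in visited:
--                 return None
--             c2 = dict(counts)
--             c2[s[w]] = c2.get(s[w], 0) + 1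
--             sub = dfs(w, visited | {w}, c2)
--             if sub is None:
--                 return None
--             if best < sub:
--                 best = sub
--         return best
--
--     best = 0
--     for v in range(n):
--         r = dfs(v, {v}, {s[v]: 1})
--         if r is None:
--             return None
--         if best < r:
--             best = r
--     return best
-- ===== Notes on version B (the rewrite author's own statement) =====
-- stated objective: alternative
-- what changed: A's explicit stack of (path-string, visited-set, node) triples, which rebuilds a Counter of the whole path string at every popped node, is replaced by a recursive DFS that returns each subtree's best value and maintains the character counts incrementally in a dict, so the per-node full-path recount disappears.
-- outside the precondition, e.g. on max_path('ab', [(1, 0), (0, 1), (1, 5)]): A returns None, B returns None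
import Mathlib
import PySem

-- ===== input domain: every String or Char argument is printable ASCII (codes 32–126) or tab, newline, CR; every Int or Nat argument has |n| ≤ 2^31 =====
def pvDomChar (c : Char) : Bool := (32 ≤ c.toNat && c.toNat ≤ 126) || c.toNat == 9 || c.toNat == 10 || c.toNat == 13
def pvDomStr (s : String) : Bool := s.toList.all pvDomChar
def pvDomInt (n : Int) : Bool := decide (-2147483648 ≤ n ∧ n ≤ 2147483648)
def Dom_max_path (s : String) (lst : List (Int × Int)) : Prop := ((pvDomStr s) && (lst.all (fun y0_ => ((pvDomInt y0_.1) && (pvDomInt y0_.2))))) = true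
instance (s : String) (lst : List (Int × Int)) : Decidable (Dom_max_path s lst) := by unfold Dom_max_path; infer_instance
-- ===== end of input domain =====

-- B replaces A's explicit stack of (path-string, visited-set, node) triples — which re-counts the
-- whole path with Counter at every popped node — by a recursive DFS that maintains the character
-- counts incrementally in a dict and combines per-subtree maxima (objective: alternative).

-- ===== PORT A =====
-- shared by both ports: 'adj = [[] for v in s]; for u, v in lst: adj[u].append(v)' (identical lines in Source A and Source B)
def pvAdjStep (adj : List (List Int)) (e : Int × Int) : List (List Int) :=
  match PySem.List.pyGet? adj e.1 with
  | some l => PySem.List.pySetD adj e.1 (l ++ [e.2])   -- adj[u].append(v)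
  | none => adj                                        -- adj[u] raises IndexError in Python; excluded by Pre_

def pvBuildAdj (n : Nat) (lst : List (Int × Int)) : List (List Int) :=
  lst.foldl pvAdjStep (List.replicate n [])

-- Counter(path_string).most_common(1)[0][1]: the maximal multiplicity, i.e. max of the counter's values
def pvPathVal (path : List Char) : Int :=
  (PySem.List.max? (PySem.Dict.counter path).values (fun x => x)).getD 0

-- the inner 'for neighbour in adj[current_node]' loop: none = the 'return None' on a revisit,
-- otherwise the list of items appended to the stack, in append order
def pvPush (cs : List Char) (path : List Char) (visited : List Int) :
    List Int → Option (List (List Char × List Int × Int))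
  | [] => some []
  | w :: ws =>
    if PySem.Set.contains visited w then none
    else
      match PySem.List.pyGet? cs w with
      | none => none          -- s[neighbour] raises IndexError in Python; excluded by Pre_
      | some c =>
        (pvPush cs path visited ws).map
          (fun items => (path ++ [c], PySem.Set.union visited [w], w) :: items)

-- the 'while stack' loop; the stack is kept top-first (Python's stack.pop() takes the last element).
-- fuel only makes the loop total; the fuel passed below is sufficient (proved in pvLoopA_eq_fold).
def pvLoopA (cs : List Char) (adj : List (List Int)) :
    Nat → List (List Char × List Int × Int) → Int → Option Int
  | 0, _, _ => none
  | _ + 1, [], acc => some acc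
  | f + 1, (path, visited, node) :: rest, acc =>
    let acc' := max acc (pvPathVal path)
    match pvPush cs path visited (PySem.List.pyGetD adj node []) with
    | none => none
    | some items => pvLoopA cs adj f (items.reverse ++ rest) acc'

-- 'for v in range(len(s))'
def pvOuterA (cs : List Char) (adj : List (List Int)) (fuel : Nat) :
    List Nat → Int → Option Int
  | [], acc => some acc
  | v :: vs, acc =>
    match PySem.List.pyGet? cs (v : Int) with
    | none => none            -- unreachable: v < len(s)
    | some c =>
      match pvLoopA cs adj fuel [([c], [(v : Int)], (v : Int))] acc with
      | none => none
      | some acc' => pvOuterA cs adj fuel vs acc'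

def max_path (s : String) (lst : List (Int × Int)) : Option Int :=
  let cs := s.toList
  let adj := pvBuildAdj cs.length lst
  pvOuterA cs adj ((lst.length + 1) ^ (2 * cs.length) + 1) (List.range cs.length) 0

-- ===== PORT B =====
-- dfs(node, visited, counts): best value over all extensions of the current path, None on a cycle;
-- counts is maintained incrementally.  Fuel only makes the recursion total; 2*len(s)+2 is sufficient
-- inside Pre_ (the recursion depth is bounded by the visited set, proved below).
mutual
def pvDfsB (cs : List Char) (adj : List (List Int)) (fuel : Nat) (node : Int)
    (visited : List Int) (counts : PySem.Dict Char Int) : Option Int :=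
  match fuel with
  | 0 => none
  | f + 1 =>
    pvForB cs adj f visited counts (PySem.List.pyGetD adj node [])
      ((PySem.List.max? counts.values (fun x => x)).getD 0)   -- best = max(counts.values())
termination_by (fuel, 0)

-- the 'for w in adj[node]' loop of dfs
def pvForB (cs : List Char) (adj : List (List Int)) (fuel : Nat) (visited : List Int)
    (counts : PySem.Dict Char Int) (ws : List Int) (best : Int) : Option Int :=
  match ws with
  | [] => some best
  | w :: ws' =>
    if PySem.Set.contains visited w then none
    else
      match PySem.List.pyGet? cs w with
      | none => none          -- s[w] raises IndexError in Python; excluded by Pre_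
      | some c =>
        let c2 := counts.insert c (counts.getD c 0 + 1)   -- c2 = dict(counts); c2[s[w]] = c2.get(s[w], 0) + 1
        match pvDfsB cs adj fuel w (PySem.Set.union visited [w]) c2 with
        | none => none
        | some sub => pvForB cs adj fuel visited counts ws' (if best < sub then sub else best)
termination_by (fuel, ws.length + 1)
end

-- 'for v in range(n)'
def pvOuterB (cs : List Char) (adj : List (List Int)) : List Nat → Int → Option Int
  | [], best => some best
  | v :: vs, best =>
    match PySem.List.pyGet? cs (v : Int) with
    | none => none            -- unreachable: v < len(s)
    | some c =>
      match pvDfsB cs adj (2 * cs.length + 2) (v : Int) [(v : Int)] (PySem.Dict.ofList [(c, 1)]) with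
      | none => none
      | some r => pvOuterB cs adj vs (if best < r then r else best)

def max_path_alt (s : String) (lst : List (Int × Int)) : Option Int :=
  let cs := s.toList
  let adj := pvBuildAdj cs.length lst
  pvOuterB cs adj (List.range cs.length) 0

-- ===== PRECONDITION & SPEC =====
-- Pre_ excludes lists containing an edge endpoint outside [-len(s), len(s)): Python A raises
-- IndexError on such an endpoint, except when its traversal order happens to meet a cycle before
-- the bad index and returns None — an order-dependent accident (B returns None there too).
def Pre_max_path (s : String) (lst : List (Int × Int)) : Prop :=
  ∀ e ∈ lst, PySem.Raise.InRange s.length e.1 ∧ PySem.Raise.InRange s.length e.2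
instance (s : String) (lst : List (Int × Int)) : Decidable (Pre_max_path s lst) := by
  unfold Pre_max_path; infer_instance

def pvWitness_max_path : String × (List (Int × Int)) := ("ab", [((0 : Int), (1 : Int))])

def Spec_max_path (s : String) (lst : List (Int × Int)) (out : Option Int) : Prop := out = max_path_alt s lst
instance (s : String) (lst : List (Int × Int)) (out : Option Int) : Decidable (Spec_max_path s lst out) := by unfold Spec_max_path; infer_instance

-- ===== CLAIM (what is proved, stated in full; the proofs are below) =====
def Claim_equal_max_path : Prop := ∀ (s : String) (lst : List (Int × Int)), Dom_max_path s lst → Pre_max_path s lst → Spec_max_path s lst (max_path s lst)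

-- ===== LEMMAS AND PROOFS =====

-- the invariant carried by every visited set: distinct elements of [-n, n)
def pvInv (n : Nat) (V : List Int) : Prop :=
  V.Nodup ∧ ∀ x ∈ V, -(n : Int) ≤ x ∧ x < n

-- B's dfs on a stack item, with canonical fuel; the counts dict of a path is its Counter
def pvVal (cs : List Char) (adj : List (List Int)) (it : List Char × List Int × Int) : Option Int :=
  pvDfsB cs adj (2 * cs.length + 2) it.2.2 it.2.1 (PySem.Dict.counter it.1)

-- what A's stack loop computes: fold B's per-item values, none-absorbing, max-accumulating
def pvFold (cs : List Char) (adj : List (List Int)) :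
    List (List Char × List Int × Int) → Int → Option Int
  | [], acc => some acc
  | it :: l, acc =>
    match pvVal cs adj it with
    | none => none
    | some m => pvFold cs adj l (max acc m)

theorem pvInv_length {n : Nat} {V : List Int} (h : pvInv n V) : V.length ≤ 2 * n := by
  have h1 : V.toFinset.card = V.length := List.toFinset_card_of_nodup h.1
  have h2 : V.toFinset ⊆ Finset.Ico (-(n : Int)) n := by
    intro x hx
    rw [List.mem_toFinset] at hx
    rw [Finset.mem_Ico]
    exact (h.2 x hx)
  have h3 := Finset.card_le_card h2
  rw [Int.card_Ico] at h3
  omega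

theorem pvContains_false {V : List Int} {w : Int}
    (h : ¬ PySem.Set.contains V w = true) : w ∉ V := by
  simp only [PySem.Set.contains, List.contains_iff_mem] at h; exact h

theorem pvUnion_singleton {V : List Int} {w : Int}
    (h : ¬ PySem.Set.contains V w = true) : PySem.Set.union V [w] = V ++ [w] := by
  have hw : w ∉ V := pvContains_false h
  simp [PySem.Set.union, PySem.Set.update, PySem.Set.add, PySem.Set.contains, hw]


theorem pvRange_of_get {cs : List Char} {w : Int} {c : Char}
    (h : PySem.List.pyGet? cs w = some c) : -(cs.length : Int) ≤ w ∧ w < cs.length := by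
  by_contra hcon
  have : ¬ PySem.Raise.InRange cs.length w := by
    unfold PySem.Raise.InRange; exact hcon
  rw [← PySem.List.pyGet?_eq_none_iff] at this
  rw [h] at this
  exact absurd this (by simp)

theorem pvInv_push {n : Nat} {V : List Int} {w : Int} (hV : pvInv n V) (hw : w ∉ V)
    (hr : -(n : Int) ≤ w ∧ w < n) : pvInv n (V ++ [w]) := by
  constructor
  · simpa [List.nodup_append] using ⟨hV.1, fun a ha hew => hw (hew ▸ ha)⟩
  · intro x hx
    rcases List.mem_append.mp hx with hx | hx
    · exact hV.2 x hx
    · rw [List.mem_singleton.mp hx]; exact hr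

theorem pvForB_fuel (cs : List Char) (adj : List (List Int)) :
    ∀ (f₁ f₂ : Nat) (V : List Int), pvInv cs.length V →
      2 * cs.length - V.length ≤ f₁ → 2 * cs.length - V.length ≤ f₂ →
      ∀ (ws : List Int) (counts : PySem.Dict Char Int) (best : Int),
        pvForB cs adj f₁ V counts ws best = pvForB cs adj f₂ V counts ws best := by
  intro f₁
  induction f₁ using Nat.strong_induction_on with
  | _ f₁ IH =>
  intro f₂ V hV h1 h2 ws
  induction ws with
  | nil => intro counts best; rw [pvForB, pvForB]
  | cons w ws ihws =>
    intro counts best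
    rw [pvForB, pvForB]
    by_cases hc : PySem.Set.contains V w = true
    · rw [if_pos hc, if_pos hc]
    · rw [if_neg hc, if_neg hc]
      cases hg : PySem.List.pyGet? cs w with
      | none => rfl
      | some c =>
        dsimp only
        have hw : w ∉ V := pvContains_false hc
        have hr := pvRange_of_get hg
        have hV' : pvInv cs.length (V ++ [w]) := pvInv_push hV hw hr
        have hlen : (V ++ [w]).length ≤ 2 * cs.length := pvInv_length hV'
        simp only [List.length_append, List.length_cons, List.length_nil] at hlen
        obtain ⟨g₁, rfl⟩ : ∃ g, f₁ = g + 1 := ⟨f₁ - 1, by omega⟩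
        obtain ⟨g₂, rfl⟩ : ∃ g, f₂ = g + 1 := ⟨f₂ - 1, by omega⟩
        rw [pvUnion_singleton hc]
        rw [pvDfsB, pvDfsB]
        have hinner := IH g₁ (by omega) g₂ (V ++ [w]) hV'
          (by simp only [List.length_append, List.length_cons, List.length_nil]; omega)
          (by simp only [List.length_append, List.length_cons, List.length_nil]; omega)
          (PySem.List.pyGetD adj w []) (counts.insert c (counts.getD c 0 + 1))
          ((PySem.List.max? (counts.insert c (counts.getD c 0 + 1)).values (fun x => x)).getD 0)
        rw [hinner]
        cases pvForB cs adj g₂ (V ++ [w]) (counts.insert c (counts.getD c 0 + 1))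
            (PySem.List.pyGetD adj w [])
            ((PySem.List.max? (counts.insert c (counts.getD c 0 + 1)).values (fun x => x)).getD 0) with
        | none => rfl
        | some sub => exact ihws counts (if best < sub then sub else best)

theorem pvDfsB_fuel (cs : List Char) (adj : List (List Int)) :
    ∀ (f₁ f₂ : Nat) (V : List Int), pvInv cs.length V →
      2 * cs.length + 1 - V.length ≤ f₁ → 2 * cs.length + 1 - V.length ≤ f₂ →
      ∀ (node : Int) (counts : PySem.Dict Char Int),
        pvDfsB cs adj f₁ node V counts = pvDfsB cs adj f₂ node V counts := by
  intro f₁ f₂ V hV h1 h2 node counts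
  have hlen := pvInv_length hV
  obtain ⟨g₁, rfl⟩ : ∃ g, f₁ = g + 1 := ⟨f₁ - 1, by omega⟩
  obtain ⟨g₂, rfl⟩ : ∃ g, f₂ = g + 1 := ⟨f₂ - 1, by omega⟩
  rw [pvDfsB, pvDfsB]
  exact pvForB_fuel cs adj g₁ g₂ V hV (by omega) (by omega) _ _ _

theorem pvForB_none (cs : List Char) (adj : List (List Int)) :
    ∀ (ws : List Int) (f : Nat) (V : List Int) (counts : PySem.Dict Char Int) (best : Int),
      (∃ w ∈ ws, PySem.Set.contains V w = true ∨ PySem.List.pyGet? cs w = none) →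
      pvForB cs adj f V counts ws best = none := by
  intro ws
  induction ws with
  | nil => rintro f V counts best ⟨w, hw, _⟩; exact absurd hw (List.not_mem_nil)
  | cons w ws ih =>
    intro f V counts best ⟨x, hx, hbad⟩
    rw [pvForB]
    by_cases hc : PySem.Set.contains V w = true
    · rw [if_pos hc]
    · rw [if_neg hc]
      rcases List.mem_cons.mp hx with rfl | hxs
      · rcases hbad with hb | hb
        · exact absurd hb hc
        · rw [hb]
      cases hg2 : PySem.List.pyGet? cs w with
      | none => rfl
      | some c =>
        dsimp only
        cases pvDfsB cs adj f w (PySem.Set.union V [w])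
            (counts.insert c (counts.getD c 0 + 1)) with
        | none => rfl
        | some sub => exact ih f V counts _ ⟨x, hxs, hbad⟩

theorem pvPush_none (cs : List Char) (path : List Char) (V : List Int) :
    ∀ ws, pvPush cs path V ws = none →
      ∃ w ∈ ws, PySem.Set.contains V w = true ∨ PySem.List.pyGet? cs w = none := by
  intro ws
  induction ws with
  | nil => intro h; exact absurd h (by simp [pvPush])
  | cons w ws ih =>
    intro h
    rw [pvPush] at h
    by_cases hc : PySem.Set.contains V w = true
    · exact ⟨w, List.mem_cons_self, Or.inl hc⟩
    · simp only [hc, Bool.false_eq_true, if_false] at h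
      cases hg : PySem.List.pyGet? cs w with
      | none => exact ⟨w, List.mem_cons_self, Or.inr hg⟩
      | some c =>
        rw [hg] at h
        cases hp : pvPush cs path V ws with
        | none =>
          obtain ⟨x, hx, hb⟩ := ih hp
          exact ⟨x, List.mem_cons_of_mem _ hx, hb⟩
        | some items => rw [hp] at h; exact absurd h (by simp)

theorem pvIf_max (a b : Int) : (if a < b then b else a) = max a b := by
  by_cases h : a < b
  · simp [h, max_eq_right h.le]
  · simp [h, max_eq_left (not_lt.mp h)]

theorem pvCounter_push (path : List Char) (c : Char) :
    (PySem.Dict.counter path).insert c ((PySem.Dict.counter path).getD c 0 + 1) =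
      PySem.Dict.counter (path ++ [c]) := by
  rw [PySem.Dict.counter_append_singleton]; rfl

theorem pvPush_facts (cs path : List Char) :
    ∀ (ws : List Int) (V : List Int) (items : List (List Char × List Int × Int)),
      pvInv cs.length V → pvPush cs path V ws = some items →
      items.length = ws.length ∧
        ∀ it ∈ items, pvInv cs.length it.2.1 ∧ it.2.1.length = V.length + 1 := by
  intro ws
  induction ws with
  | nil =>
    intro V items _ h
    rw [pvPush] at h
    obtain rfl : ([] : List (List Char × List Int × Int)) = items := by simpa using h
    exact ⟨rfl, by simp⟩
  | cons w ws ih =>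
    intro V items hV h
    rw [pvPush] at h
    by_cases hc : PySem.Set.contains V w = true
    · rw [if_pos hc] at h; exact absurd h (by simp)
    · rw [if_neg hc] at h
      cases hg : PySem.List.pyGet? cs w with
      | none => rw [hg] at h; exact absurd h (by simp)
      | some c =>
        rw [hg] at h
        cases hp : pvPush cs path V ws with
        | none => rw [hp] at h; exact absurd h (by simp)
        | some items' =>
          rw [hp] at h
          simp only [Option.map_some, Option.some_inj] at h
          subst h
          obtain ⟨hlen, hall⟩ := ih V items' hV hp
          have hun : PySem.Set.union V [w] = V ++ [w] := pvUnion_singleton hc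
          have hV' : pvInv cs.length (V ++ [w]) :=
            pvInv_push hV (pvContains_false hc) (pvRange_of_get hg)
          refine ⟨by simp [hlen], ?_⟩
          intro it hit
          rcases List.mem_cons.mp hit with rfl | hmem
          · simp only [hun]
            exact ⟨hV', by simp⟩
          · exact hall it hmem

theorem pvForB_eq_fold (cs : List Char) (adj : List (List Int)) :
    ∀ (ws : List Int) (items : List (List Char × List Int × Int)) (path : List Char)
      (V : List Int) (f : Nat) (b : Int), pvInv cs.length V →
      pvPush cs path V ws = some items →
      2 * cs.length - V.length ≤ f →
      pvForB cs adj f V (PySem.Dict.counter path) ws b = pvFold cs adj items b := by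
  intro ws
  induction ws with
  | nil =>
    intro items path V f b _ h _
    rw [pvPush] at h
    obtain rfl : ([] : List (List Char × List Int × Int)) = items := by simpa using h
    rw [pvForB]; rfl
  | cons w ws ih =>
    intro items path V f b hV h hf
    rw [pvPush] at h
    by_cases hc : PySem.Set.contains V w = true
    · rw [if_pos hc] at h; exact absurd h (by simp)
    · rw [if_neg hc] at h
      cases hg : PySem.List.pyGet? cs w with
      | none => rw [hg] at h; exact absurd h (by simp)
      | some c =>
        rw [hg] at h
        cases hp : pvPush cs path V ws with
        | none => rw [hp] at h; exact absurd h (by simp)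
        | some items' =>
          rw [hp] at h
          simp only [Option.map_some, Option.some_inj] at h
          subst h
          rw [pvForB, if_neg hc, hg]
          dsimp only
          have hun : PySem.Set.union V [w] = V ++ [w] := pvUnion_singleton hc
          have hV' : pvInv cs.length (V ++ [w]) :=
            pvInv_push hV (pvContains_false hc) (pvRange_of_get hg)
          have hlen' : (V ++ [w]).length ≤ 2 * cs.length := pvInv_length hV'
          simp only [List.length_append, List.length_cons, List.length_nil] at hlen'
          have hfuel := pvDfsB_fuel cs adj f (2 * cs.length + 2) (V ++ [w]) hV'
            (by simp only [List.length_append, List.length_cons, List.length_nil]; omega)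
            (by simp only [List.length_append, List.length_cons, List.length_nil]; omega)
            w (PySem.Dict.counter (path ++ [c]))
          rw [hun, pvCounter_push, hfuel]
          rw [pvFold]
          have hval : pvVal cs adj (path ++ [c], V ++ [w], w) =
              pvDfsB cs adj (2 * cs.length + 2) w (V ++ [w]) (PySem.Dict.counter (path ++ [c])) := rfl
          rw [← hval]
          cases hres : pvVal cs adj (path ++ [c], V ++ [w], w) with
          | none => rfl
          | some sub =>
            dsimp only
            rw [pvIf_max]
            exact ih items' path V f (max b sub) hV hp hf

theorem pvFold_append (cs : List Char) (adj : List (List Int)) :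
    ∀ l₁ l₂ a, pvFold cs adj (l₁ ++ l₂) a =
      match pvFold cs adj l₁ a with
      | none => none
      | some m => pvFold cs adj l₂ m := by
  intro l₁ l₂ a
  induction l₁ generalizing a with
  | nil => simp [pvFold]
  | cons it t ih =>
    simp only [List.cons_append, pvFold]
    cases pvVal cs adj it with
    | none => rfl
    | some m => exact ih (max a m)

theorem pvFold_acc (cs : List Char) (adj : List (List Int)) :
    ∀ l a b, pvFold cs adj l (max a b) = (pvFold cs adj l b).map (fun m => max a m) := by
  intro l a b
  induction l generalizing b with
  | nil => simp [pvFold]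
  | cons it t ih =>
    cases hv : pvVal cs adj it with
    | none => simp [pvFold, hv]
    | some k =>
      simp only [pvFold, hv]
      rw [max_assoc a b k]
      exact ih (max b k)

theorem pvFold_reverse (cs : List Char) (adj : List (List Int)) :
    ∀ l a, pvFold cs adj l.reverse a = pvFold cs adj l a := by
  intro l a
  induction l generalizing a with
  | nil => rfl
  | cons it t ih =>
    rw [List.reverse_cons, pvFold_append]
    rw [ih a]
    cases hv : pvVal cs adj it with
    | none =>
      simp only [pvFold, hv]
      cases hf : pvFold cs adj t a with
      | none => rfl
      | some m => simp
    | some k =>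
      simp only [pvFold, hv]
      rw [max_comm a k, pvFold_acc cs adj t k a]
      cases hf : pvFold cs adj t a with
      | none => rfl
      | some m => simp [max_comm]

-- weight of a stack; (E+1)^(2n+1-|V|) per item
def pvWeight (E n : Nat) (it : List Char × List Int × Int) : Nat :=
  (E + 1) ^ (2 * n + 1 - it.2.1.length)

def pvMeasure (E n : Nat) (stack : List (List Char × List Int × Int)) : Nat :=
  (stack.map (pvWeight E n)).sum

theorem pvLoopA_eq_fold (cs : List Char) (adj : List (List Int)) (E : Nat)
    (hadj : ∀ node : Int, (PySem.List.pyGetD adj node []).length ≤ E) :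
    ∀ (f : Nat) (stack : List (List Char × List Int × Int)) (acc : Int),
      (∀ it ∈ stack, pvInv cs.length it.2.1) →
      pvMeasure E cs.length stack < f →
      pvLoopA cs adj f stack acc = pvFold cs adj stack acc := by
  intro f
  induction f with
  | zero => intro stack acc _ hm; exact absurd hm (Nat.not_lt_zero _)
  | succ f ih =>
    intro stack acc hinv hm
    match stack with
    | [] => rw [pvLoopA]; rfl
    | (path, V, node) :: rest =>
      rw [pvLoopA]
      have hV : pvInv cs.length V := hinv _ (List.mem_cons_self)
      have hVle : V.length ≤ 2 * cs.length := pvInv_length hV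
      cases hp : pvPush cs path V (PySem.List.pyGetD adj node []) with
      | none =>
        have hnone : pvVal cs adj (path, V, node) = none := by
          obtain ⟨g, hg⟩ : ∃ g, 2 * cs.length + 2 = g + 1 := ⟨2 * cs.length + 1, rfl⟩
          rw [pvVal, hg, pvDfsB]
          exact pvForB_none cs adj _ _ _ _ _ (pvPush_none cs path V _ hp)
        show (none : Option Int) = pvFold cs adj ((path, V, node) :: rest) acc
        rw [pvFold, hnone]
      | some items =>
        dsimp only
        obtain ⟨hitems_len, hitems⟩ := pvPush_facts cs path _ V items hV hp
        -- the new stack satisfies the invariant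
        have hinv' : ∀ it ∈ items.reverse ++ rest, pvInv cs.length it.2.1 := by
          intro it hit
          rcases List.mem_append.mp hit with hit | hit
          · exact (hitems it (List.mem_reverse.mp hit)).1
          · exact hinv it (List.mem_cons_of_mem _ hit)
        -- the measure strictly decreases
        have hmeas : pvMeasure E cs.length (items.reverse ++ rest) < f := by
          have hwb : ∀ x ∈ (items.reverse.map (pvWeight E cs.length)),
              x ≤ (E + 1) ^ (2 * cs.length - V.length) := by
            intro x hx
            obtain ⟨it, hit, rfl⟩ := List.mem_map.mp hx
            have := (hitems it (List.mem_reverse.mp hit)).2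
            unfold pvWeight
            rw [this]
            have : 2 * cs.length + 1 - (V.length + 1) = 2 * cs.length - V.length := by omega
            rw [this]
          have hsum : (items.reverse.map (pvWeight E cs.length)).sum ≤
              items.length * (E + 1) ^ (2 * cs.length - V.length) := by
            have := List.sum_le_card_nsmul (items.reverse.map (pvWeight E cs.length))
              ((E + 1) ^ (2 * cs.length - V.length)) hwb
            simpa [smul_eq_mul] using this
          have hlenE : items.length ≤ E := by
            rw [hitems_len]; exact hadj node
          have hkey : items.length * (E + 1) ^ (2 * cs.length - V.length) + 1 ≤
              (E + 1) ^ (2 * cs.length + 1 - V.length) := by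
            have h1 : 2 * cs.length + 1 - V.length = (2 * cs.length - V.length) + 1 := by omega
            rw [h1, pow_succ]
            have hpow : 1 ≤ (E + 1) ^ (2 * cs.length - V.length) := Nat.one_le_pow _ _ (by omega)
            calc items.length * (E + 1) ^ (2 * cs.length - V.length) + 1
                ≤ E * (E + 1) ^ (2 * cs.length - V.length) +
                    (E + 1) ^ (2 * cs.length - V.length) := by
                  have := Nat.mul_le_mul_right ((E + 1) ^ (2 * cs.length - V.length)) hlenE
                  omega
              _ = (E + 1) ^ (2 * cs.length - V.length) * (E + 1) := by ring
          have hold : pvMeasure E cs.length ((path, V, node) :: rest) =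
              (E + 1) ^ (2 * cs.length + 1 - V.length) +
                pvMeasure E cs.length rest := by
            unfold pvMeasure pvWeight
            simp
          unfold pvMeasure at hold hm ⊢
          rw [List.map_append, List.sum_append]
          rw [hold] at hm
          omega
        rw [ih (items.reverse ++ rest) (max acc (pvPathVal path)) hinv' hmeas]
        -- now pure pvFold algebra
        rw [pvFold_append, pvFold_reverse]
        have hval : pvVal cs adj (path, V, node) = pvFold cs adj items (pvPathVal path) := by
          obtain ⟨g, hg⟩ : ∃ g, 2 * cs.length + 2 = g + 1 := ⟨2 * cs.length + 1, rfl⟩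
          rw [pvVal, hg, pvDfsB]
          exact pvForB_eq_fold cs adj _ items path V _ (pvPathVal path) hV hp (by omega)
        show (match pvFold cs adj items (max acc (pvPathVal path)) with
              | none => none
              | some m => pvFold cs adj rest m) =
            pvFold cs adj ((path, V, node) :: rest) acc
        rw [pvFold, hval, pvFold_acc]
        cases pvFold cs adj items (pvPathVal path) with
        | none => rfl
        | some m => rfl

theorem pvAdjStep_mem {adj : List (List Int)} {e : Int × Int} {l : List Int}
    (h : l ∈ pvAdjStep adj e) : l ∈ adj ∨ ∃ l0 ∈ adj, l = l0 ++ [e.2] := by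
  unfold pvAdjStep at h
  cases hg : PySem.List.pyGet? adj e.1 with
  | none => rw [hg] at h; exact Or.inl h
  | some l0 =>
    rw [hg] at h
    unfold PySem.List.pySetD PySem.List.pySet? at h
    cases hk : PySem.List.pyIdx? adj.length e.1 with
    | none => rw [hk] at h; exact Or.inl h
    | some k =>
      rw [hk] at h
      simp only [Option.map_some, Option.getD_some] at h
      rcases List.mem_or_eq_of_mem_set h with hm | rfl
      · exact Or.inl hm
      · exact Or.inr ⟨l0, PySem.List.mem_of_pyGet?_eq_some adj hg, rfl⟩

theorem pvBuildAdj_aux (lst : List (Int × Int)) :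
    ∀ (adj : List (List Int)) (c : Nat), (∀ l ∈ adj, l.length ≤ c) →
      ∀ l ∈ lst.foldl pvAdjStep adj, l.length ≤ c + lst.length := by
  induction lst with
  | nil => intro adj c h l hl; simpa using h l hl
  | cons e es ih =>
    intro adj c h l hl
    rw [List.foldl_cons] at hl
    have hstep : ∀ l' ∈ pvAdjStep adj e, l'.length ≤ c + 1 := by
      intro l' hl'
      rcases pvAdjStep_mem hl' with hm | ⟨l0, hl0, rfl⟩
      · exact le_trans (h l' hm) (Nat.le_succ c)
      · have := h l0 hl0
        simp only [List.length_append, List.length_cons, List.length_nil]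
        omega
    have := ih (pvAdjStep adj e) (c + 1) hstep l hl
    simp only [List.length_cons]
    omega

theorem pvBuildAdj_bound (n : Nat) (lst : List (Int × Int)) :
    ∀ node : Int, (PySem.List.pyGetD (pvBuildAdj n lst) node []).length ≤ lst.length := by
  intro node
  unfold PySem.List.pyGetD
  cases hg : PySem.List.pyGet? (pvBuildAdj n lst) node with
  | none => simp
  | some l =>
    simp only [Option.getD_some]
    have hmem := PySem.List.mem_of_pyGet?_eq_some _ hg
    have := pvBuildAdj_aux lst (List.replicate n []) 0
      (by intro l' hl'; simp [List.eq_of_mem_replicate hl']) l hmem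
    omega

theorem pvOuter_eq (cs : List Char) (lst : List (Int × Int)) :
    ∀ (vs : List Nat) (acc : Int), (∀ v ∈ vs, v < cs.length) →
      pvOuterA cs (pvBuildAdj cs.length lst) ((lst.length + 1) ^ (2 * cs.length) + 1) vs acc =
      pvOuterB cs (pvBuildAdj cs.length lst) vs acc := by
  intro vs
  induction vs with
  | nil => intro acc _; rw [pvOuterA, pvOuterB]
  | cons v vs ih =>
    intro acc hvs
    rw [pvOuterA, pvOuterB]
    cases hg : PySem.List.pyGet? cs (v : Int) with
    | none => rfl
    | some c =>
      dsimp only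
      have hv : v < cs.length := hvs v (List.mem_cons_self)
      have hloop := pvLoopA_eq_fold cs (pvBuildAdj cs.length lst) lst.length
        (pvBuildAdj_bound cs.length lst)
        ((lst.length + 1) ^ (2 * cs.length) + 1) [([c], [(v : Int)], (v : Int))] acc
        (by
          intro it hit
          rw [List.mem_singleton.mp hit]
          refine ⟨List.nodup_singleton _, ?_⟩
          intro x hx
          rw [List.mem_singleton.mp hx]
          constructor
          · have : (0 : Int) ≤ v := Int.natCast_nonneg v
            omega
          · exact_mod_cast hv)
        (by
          unfold pvMeasure pvWeight
          simp only [List.map_cons, List.map_nil, List.sum_cons, List.sum_nil]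
          have h1 : 2 * cs.length + 1 - ([(v : Int)].length) = 2 * cs.length := by
            simp
          rw [h1]
          omega)
      rw [hloop]
      have hcnt : PySem.Dict.counter [c] = PySem.Dict.ofList [(c, 1)] := rfl
      have hval : pvVal cs (pvBuildAdj cs.length lst) ([c], [(v : Int)], (v : Int)) =
          pvDfsB cs (pvBuildAdj cs.length lst) (2 * cs.length + 2) (v : Int) [(v : Int)]
            (PySem.Dict.ofList [(c, 1)]) := by
        rw [pvVal, hcnt]
      rw [pvFold, hval]
      cases pvDfsB cs (pvBuildAdj cs.length lst) (2 * cs.length + 2) (v : Int) [(v : Int)]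
          (PySem.Dict.ofList [(c, 1)]) with
      | none => rfl
      | some r =>
        dsimp only
        rw [pvIf_max]
        exact ih (max acc r) (fun x hx => hvs x (List.mem_cons_of_mem _ hx))

-- ===== VERDICT (by name: the statement is the Claim_ definition above) =====
theorem max_path_spec : Claim_equal_max_path := by
  intro s lst _ _
  unfold Spec_max_path max_path max_path_alt
  exact pvOuter_eq s.toList lst (List.range s.toList.length) 0 (fun v hv => List.mem_range.mp hv)
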